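-- pv_equiv track=rewrite | github.com/thomas-barbato/recorp | core/backend/player_actions.py | _calculate_item_occupied_coords
-- ===== SOURCE A (Python) =====
-- from typing import Optional, Dict, List, Tuple, Any
--
-- def _calculate_item_occupied_coords(coords: Dict, size: Dict) -> List[Dict[str, int]]:
--     """
--     Calcule toutes les coordonnées occupées par un objet.
--
--     Args:
--         coords (Dict): Coordonnées de l'objet
--         size (Dict): Taille de l'objet
--
--     Returns:
--         List[Dict[str, int]]: Liste des coordonnées occupées
--     """
--     coord_x, coord_y = int(coords['x']), int(coords['y'])
--     size_x, size_y = int(size['x']), int(size['y'])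
--
--     occupied = []
--
--     if size_x > 1 or size_y > 1:
--         for y in range(coord_y, coord_y + size_y):
--             for x in range(coord_x, coord_x + size_x):
--                 occupied.append({'y': y, 'x': x})
--     else:
--         occupied.append({'y': coord_y, 'x': coord_x})
--
--     return occupied
-- ===== SOURCE B (Python) =====
-- from typing import Optional, Dict, List, Tuple, Any
--
-- def _calculate_item_occupied_coords(coords: Dict, size: Dict) -> List[Dict[str, int]]:
--     """Same result as A, but the rectangle is emitted by one flattened-index
--     loop (row-major divmod) instead of two nested loops."""
--     coord_x, coord_y = int(coords['x']), int(coords['y'])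
--     size_x, size_y = int(size['x']), int(size['y'])
--
--     occupied = []
--
--     if size_x > 1 or size_y > 1:
--         for i in range(size_x * size_y):
--             occupied.append({'y': coord_y + i // size_x, 'x': coord_x + i % size_x})
--     else:
--         occupied.append({'y': coord_y, 'x': coord_x})
--
--     return occupied
-- ===== Notes on version B (the rewrite author's own statement) =====
-- stated objective: alternative
-- what changed: The nested y/x loops are replaced by a single loop over the flattened index range(size_x*size_y), recovering each cell's row and column with divmod (i // size_x, i % size_x); the size guard and single-cell branch stay.
import Mathlib
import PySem

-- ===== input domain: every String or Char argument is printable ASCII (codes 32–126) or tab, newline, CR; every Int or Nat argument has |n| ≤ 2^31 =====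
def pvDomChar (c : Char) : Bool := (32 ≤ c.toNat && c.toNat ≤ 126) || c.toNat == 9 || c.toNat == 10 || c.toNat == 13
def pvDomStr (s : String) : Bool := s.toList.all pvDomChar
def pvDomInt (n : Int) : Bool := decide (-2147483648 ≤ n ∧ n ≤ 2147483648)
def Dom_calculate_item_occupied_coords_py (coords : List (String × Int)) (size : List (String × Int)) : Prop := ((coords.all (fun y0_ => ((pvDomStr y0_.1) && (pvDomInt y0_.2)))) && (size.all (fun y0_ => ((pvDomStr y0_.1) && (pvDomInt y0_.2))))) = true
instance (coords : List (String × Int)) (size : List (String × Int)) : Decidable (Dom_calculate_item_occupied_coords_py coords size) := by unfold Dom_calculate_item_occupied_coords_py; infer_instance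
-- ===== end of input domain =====

-- B replaces A's nested y/x loops by one flattened-index loop with divmod; same cells, same order (alternative decomposition, same cost).


-- ===== PORT A =====
-- A: nested for-loops appending {'y': y, 'x': x} row by row.
def calculate_item_occupied_coords_py (coords : List (String × Int)) (size : List (String × Int)) : List (List (String × Int)) :=
  match List.lookup "x" coords, List.lookup "y" coords, List.lookup "x" size, List.lookup "y" size with
  | some coord_x, some coord_y, some size_x, some size_y =>
    if size_x > 1 ∨ size_y > 1 then
      (PySem.List.pyRange coord_y (coord_y + size_y) 1).foldl (fun occupied y =>
        (PySem.List.pyRange coord_x (coord_x + size_x) 1).foldl (fun occupied x =>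
          occupied ++ [[("y", y), ("x", x)]]) occupied) []
    else
      [[("y", coord_y), ("x", coord_x)]]
  | _, _, _, _ => []   -- KeyError: excluded by Pre_

-- ===== PORT B =====
-- B: one loop over the flattened index, divmod recovers row/column.
def calculate_item_occupied_coords_py_alt (coords : List (String × Int)) (size : List (String × Int)) : List (List (String × Int)) :=
  match List.lookup "x" coords with
  | none => []   -- KeyError: excluded by Pre_
  | some coord_x =>
  match List.lookup "y" coords with
  | none => []
  | some coord_y =>
  match List.lookup "x" size with
  | none => []
  | some size_x =>
  match List.lookup "y" size with
  | none => []
  | some size_y =>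
    if size_x > 1 ∨ size_y > 1 then
      (PySem.List.pyRange 0 (size_x * size_y) 1).foldl (fun occupied i =>
        occupied ++ [[("y", coord_y + PySem.Int.floordiv i size_x), ("x", coord_x + PySem.Int.mod i size_x)]]) []
    else
      [[("y", coord_y), ("x", coord_x)]]

-- ===== PRECONDITION & SPEC =====
-- Pre_ excludes exactly the inputs where A raises KeyError: a dict missing key 'x' or 'y'.
def Pre_calculate_item_occupied_coords_py (coords : List (String × Int)) (size : List (String × Int)) : Prop :=
  (List.lookup "x" coords).isSome ∧ (List.lookup "y" coords).isSome ∧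
  (List.lookup "x" size).isSome ∧ (List.lookup "y" size).isSome
instance (coords : List (String × Int)) (size : List (String × Int)) : Decidable (Pre_calculate_item_occupied_coords_py coords size) := by unfold Pre_calculate_item_occupied_coords_py; infer_instance

def pvWitness_calculate_item_occupied_coords_py : (List (String × Int)) × (List (String × Int)) :=
  ([("x", 4), ("y", 5)], [("x", 2), ("y", 3)])

def Spec_calculate_item_occupied_coords_py (coords : List (String × Int)) (size : List (String × Int)) (out : List (List (String × Int))) : Prop := out = calculate_item_occupied_coords_py_alt coords size
instance (coords : List (String × Int)) (size : List (String × Int)) (out : List (List (String × Int))) : Decidable (Spec_calculate_item_occupied_coords_py coords size out) := by unfold Spec_calculate_item_occupied_coords_py; infer_instance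

-- ===== CLAIM (what is proved, stated in full; the proofs are below) =====
def Claim_equal_calculate_item_occupied_coords_py : Prop := ∀ (coords : List (String × Int)) (size : List (String × Int)), Dom_calculate_item_occupied_coords_py coords size → Pre_calculate_item_occupied_coords_py coords size → Spec_calculate_item_occupied_coords_py coords size (calculate_item_occupied_coords_py coords size)

-- ===== LEMMAS AND PROOFS =====

-- Core: the flattened row-major enumeration of an n×m grid equals the nested one.
theorem flatten_grid {α : Type} (n m : Nat) (f : Int → Int → α) (hn : 0 < n) :
    (List.range (n * m)).map (fun (k : Nat) => f (PySem.Int.floordiv (k : Int) (n : Int)) (PySem.Int.mod (k : Int) (n : Int)))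
      = (List.range m).flatMap (fun (y : Nat) => (List.range n).map (fun (x : Nat) => f (y : Int) (x : Int))) := by
  induction m with
  | zero => simp
  | succ m ih =>
    rw [Nat.mul_succ, List.range_add, List.map_append, ih, List.range_succ,
        List.flatMap_append]
    congr 1
    simp only [List.map_map, List.flatMap_cons, List.flatMap_nil, List.append_nil]
    apply List.map_congr_left
    intro x hx
    rw [List.mem_range] at hx
    have h1 : ((n * m + x : Nat) : Int) = (n : Int) * (m : Nat) + (x : Nat) := by push_cast; ring
    simp only [Function.comp, h1]
    have hfd : PySem.Int.floordiv ((n : Int) * m + x) n = m := by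
      rw [PySem.Int.floordiv_eq_iff_of_pos (by exact_mod_cast hn)]
      constructor
      · nlinarith [Int.natCast_nonneg x]
      · have : (x : Int) < n := by exact_mod_cast hx
        nlinarith
    have hmd : PySem.Int.mod ((n : Int) * m + x) n = x := by
      have := PySem.Int.floordiv_mul_add_mod ((n : Int) * m + x) n
      rw [hfd] at this; linarith
    rw [hfd, hmd]

-- A's nested fold as a flatMap over plain ranges.
theorem portA_flatMap (cx cy sx sy : Int) :
    (PySem.List.pyRange cy (cy + sy) 1).foldl (fun occupied y =>
        (PySem.List.pyRange cx (cx + sx) 1).foldl (fun occupied x =>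
          occupied ++ [[("y", y), ("x", x)]]) occupied) []
    = (List.range sy.toNat).flatMap (fun (y : Nat) =>
        (List.range sx.toNat).map (fun (x : Nat) => [("y", cy + (y : Int)), ("x", cx + (x : Int))])) := by
  have ex : cx + sx - cx = sx := by ring
  have ey : cy + sy - cy = sy := by ring
  have inner : ∀ (y : Int) (acc : List (List (String × Int))),
      (PySem.List.pyRange cx (cx + sx) 1).foldl (fun occupied x =>
        occupied ++ [[("y", y), ("x", x)]]) acc
      = acc ++ (List.range sx.toNat).map (fun (x : Nat) => [("y", y), ("x", cx + (x : Int))]) := by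
    intro y acc
    rw [PySem.List.foldl_append_singleton_eq_map, PySem.List.pyRange_one, List.map_map, ex]
    rfl
  simp only [inner]
  rw [PySem.List.foldl_append_eq_flatMap, List.nil_append, PySem.List.pyRange_one, ey,
      List.flatMap_map]

-- B's fold as a map over the flattened plain range.
theorem portB_map (cx cy sx sy : Int) :
    (PySem.List.pyRange 0 (sx * sy) 1).foldl (fun occupied i =>
        occupied ++ [[("y", cy + PySem.Int.floordiv i sx), ("x", cx + PySem.Int.mod i sx)]]) []
    = (List.range (sx * sy).toNat).map (fun (k : Nat) =>
        [("y", cy + PySem.Int.floordiv (k : Int) sx), ("x", cx + PySem.Int.mod (k : Int) sx)]) := by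
  rw [PySem.List.foldl_append_singleton_eq_map, PySem.List.pyRange_one, List.map_map,
      List.nil_append]
  have e : sx * sy - 0 = sx * sy := by ring
  rw [e]
  simp [Function.comp]

-- The rectangle branch agrees whenever the guard holds.
theorem branch_eq (cx cy sx sy : Int) (hg : sx > 1 ∨ sy > 1) :
    (PySem.List.pyRange cy (cy + sy) 1).foldl (fun occupied y =>
        (PySem.List.pyRange cx (cx + sx) 1).foldl (fun occupied x =>
          occupied ++ [[("y", y), ("x", x)]]) occupied) []
    = (PySem.List.pyRange 0 (sx * sy) 1).foldl (fun occupied i =>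
        occupied ++ [[("y", cy + PySem.Int.floordiv i sx), ("x", cx + PySem.Int.mod i sx)]]) [] := by
  rw [portA_flatMap, portB_map]
  by_cases hsx : 0 < sx
  · by_cases hsy : 0 < sy
    · lift sx to ℕ using le_of_lt hsx with a
      lift sy to ℕ using le_of_lt hsy with b
      have hmul : ((a : Int) * (b : Int)).toNat = a * b := by
        rw [← Nat.cast_mul, Int.toNat_natCast]
      rw [hmul, Int.toNat_natCast, Int.toNat_natCast]
      exact (flatten_grid a b (fun y x => [("y", cy + y), ("x", cx + x)]) (by exact_mod_cast hsx)).symm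
    · have h1 : sy.toNat = 0 := by omega
      have h2 : (sx * sy).toNat = 0 := by
        have : sx * sy ≤ 0 := mul_nonpos_of_nonneg_of_nonpos (by omega) (by omega)
        omega
      simp [h1, h2]
  · -- sx ≤ 0: the guard forces sy > 1, both sides are empty
    have h1 : sx.toNat = 0 := by omega
    have h2 : (sx * sy).toNat = 0 := by
      have hsy : 1 < sy := by rcases hg with h | h <;> omega
      have : sx * sy ≤ 0 := mul_nonpos_of_nonpos_of_nonneg (by omega) (by omega)
      omega
    simp [h1, h2]

-- ===== VERDICT (by name: the statement is the Claim_ definition above) =====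
theorem calculate_item_occupied_coords_py_spec : Claim_equal_calculate_item_occupied_coords_py := by
  intro coords size _ hpre
  obtain ⟨hx, hy, hsx, hsy⟩ := hpre
  unfold Spec_calculate_item_occupied_coords_py
  unfold calculate_item_occupied_coords_py calculate_item_occupied_coords_py_alt
  obtain ⟨cx, hcx⟩ := Option.isSome_iff_exists.mp hx
  obtain ⟨cy, hcy⟩ := Option.isSome_iff_exists.mp hy
  obtain ⟨sx, hsx'⟩ := Option.isSome_iff_exists.mp hsx
  obtain ⟨sy, hsy'⟩ := Option.isSome_iff_exists.mp hsy
  rw [hcx, hcy, hsx', hsy']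
  dsimp only
  split_ifs with hg
  · exact branch_eq cx cy sx sy hg
  · rfl
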